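-- pv_equiv track=rewrite | github.com/Hanshin-OSS-Hub/capstone25-house-viewing | python/engines/ocr_core.py | split_line_by_xgap
-- ===== SOURCE A (Python) =====
-- X_GAP_FACTOR = 1.4
--
-- def median(vals):
--     vals = sorted(vals)
--     if not vals:
--         return None
--     n = len(vals)
--     mid = n // 2
--     return vals[mid] if n % 2 == 1 else (vals[mid - 1] + vals[mid]) / 2
--
-- def split_line_by_xgap(line_items):
--     if not line_items:
--         return []
--
--     med_w = median([it["w"] for it in line_items]) or 30
--     gap_th = max(35, int(med_w * X_GAP_FACTOR))
--
--     line_left = min(it["x1"] for it in line_items)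
--     line_right = max(it["x2"] for it in line_items)
--     line_width = max(1, line_right - line_left)
--     width_based_th = int(line_width * 0.14)
--     gap_th = min(gap_th, width_based_th)
--
--     chunks = []
--     cur = [line_items[0]]
--     for i in range(1, len(line_items)):
--         prev = line_items[i - 1]
--         now = line_items[i]
--         gap = now["x1"] - prev["x2"]
--         if gap >= gap_th:
--             chunks.append(cur)
--             cur = [now]
--         else:
--             cur.append(now)
--
--     chunks.append(cur)
--     return chunks
-- ===== SOURCE B (Python) =====
-- X_GAP_FACTOR = 1.4
--
-- def split_line_by_xgap(line_items):
--     if not line_items: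
--         return []
--
--     ws = sorted(it["w"] for it in line_items)
--     n = len(ws)
--     med_w = (ws[(n - 1) // 2] + ws[n // 2]) / 2 or 30
--     gap_th = max(35, int(med_w * X_GAP_FACTOR))
--
--     line_left = min(it["x1"] for it in line_items)
--     line_right = max(it["x2"] for it in line_items)
--     gap_th = min(gap_th, int(max(1, line_right - line_left) * 0.14))
--
--     # repeatedly cut the line at its FIRST wide gap and slice that chunk off
--     chunks = []
--     rest = line_items
--     while True:
--         cut = None
--         for i, (prev, now) in enumerate(zip(rest, rest[1:]), 1):
--             if now["x1"] - prev["x2"] >= gap_th: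
--                 cut = i
--                 break
--         if cut is None:
--             chunks.append(rest)
--             return chunks
--         chunks.append(rest[:cut])
--         rest = rest[cut:]
-- ===== Notes on version B (the rewrite author's own statement) =====
-- stated objective: alternative
-- what changed: B keeps the same threshold arithmetic (median restructured into one index formula ws[(n-1)//2]+ws[n//2]) but replaces A's running-accumulator append loop by a loop that repeatedly finds the FIRST wide gap in the remainder and slices that chunk off.
import Mathlib
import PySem

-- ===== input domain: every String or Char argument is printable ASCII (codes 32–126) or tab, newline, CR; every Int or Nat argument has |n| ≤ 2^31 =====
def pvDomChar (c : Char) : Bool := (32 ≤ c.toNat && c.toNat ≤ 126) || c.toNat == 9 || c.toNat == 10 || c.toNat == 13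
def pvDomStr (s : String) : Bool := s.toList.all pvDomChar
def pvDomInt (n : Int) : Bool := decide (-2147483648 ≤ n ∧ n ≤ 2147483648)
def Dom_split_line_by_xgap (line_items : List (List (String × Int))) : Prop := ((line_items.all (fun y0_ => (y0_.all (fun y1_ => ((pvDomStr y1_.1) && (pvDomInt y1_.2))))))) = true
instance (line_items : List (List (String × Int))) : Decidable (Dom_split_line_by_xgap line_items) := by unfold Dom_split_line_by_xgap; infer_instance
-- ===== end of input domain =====

-- B replaces A's running-accumulator chunk loop by a loop that repeatedly cuts the line at its
-- FIRST wide gap and slices that chunk off (objective: alternative decomposition, same cost;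
-- return value only).

-- ===== PORT A =====
-- it["k"] on the association-list dict: first match; KeyError (missing key) is excluded by Pre_.
def pvKey (it : List (String × Int)) (k : String) : Int := (it.lookup k).getD 0

-- Exact model of the float steps `int(med_w * 1.4)` / `int(line_width * 0.14)`:
-- round A to 53 significant bits, IEEE round-to-nearest, ties to even (exact on this domain,
-- where all products are far below 2^53 in magnitude after scaling).
def pvRnd53 (A : Nat) : Nat :=
  let b := A.log2 + 1
  if b ≤ 53 then A else
    let s := b - 53
    let q := A / 2 ^ s
    let r := A % 2 ^ s
    let q := if 2 * r > 2 ^ s ∨ (2 * r = 2 ^ s ∧ q % 2 = 1) then q + 1 else q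
    q * 2 ^ s

-- int(num/2^(e-52) * c/2^52) computed exactly: trunc toward zero of the correctly rounded double product.
def pvFMulTrunc (num : Int) (c : Nat) (e : Nat) : Int :=
  let R := pvRnd53 (num * (c : Int)).natAbs
  if num < 0 then -((R / 2 ^ e : Nat) : Int) else ((R / 2 ^ e : Nat) : Int)

-- port of the helper `median`, for the nonempty lists it is called on here, scaled by 2
-- (2×median is always an integer; the even case `(a+b)/2` is a float in Python).
def pvMedian2 (vals : List Int) : Int :=
  let s := PySem.List.sorted vals (fun v => v) false
  let n : Int := s.length
  let mid := PySem.Int.floordiv n 2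
  if PySem.Int.mod n 2 = 1 then 2 * PySem.List.pyGetD s mid 0
  else PySem.List.pyGetD s (mid - 1) 0 + PySem.List.pyGetD s mid 0

-- A's preamble: med_w (×2), the `or 30` fallback, gap_th with both caps.
def pvGapTh (line_items : List (List (String × Int))) : Int :=
  let m2 := pvMedian2 (line_items.map (fun it => pvKey it "w"))
  let m2 := if m2 = 0 then 60 else m2
  let gap_th := max 35 (pvFMulTrunc m2 6305039478318694 53)   -- int(med_w * 1.4); 1.4 = 6305039478318694/2^52
  let line_left := (PySem.List.min? (line_items.map (fun it => pvKey it "x1")) (fun v => v)).getD 0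
  let line_right := (PySem.List.max? (line_items.map (fun it => pvKey it "x2")) (fun v => v)).getD 0
  let line_width := max 1 (line_right - line_left)
  min gap_th (pvFMulTrunc line_width 5044031582654956 55)     -- int(line_width * 0.14); 0.14 = 5044031582654956/2^55

-- A's loop: for i in range(1, n) with prev = items[i-1], accumulating cur and chunks.
def pvLoopA (g : Int) (prev : List (String × Int)) (rest : List (List (String × Int)))
    (chunks : List (List (List (String × Int)))) (cur : List (List (String × Int))) :
    List (List (List (String × Int))) :=
  match rest with
  | [] => chunks ++ [cur]
  | now :: r =>
    if pvKey now "x1" - pvKey prev "x2" ≥ g then pvLoopA g now r (chunks ++ [cur]) [now]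
    else pvLoopA g now r chunks (cur ++ [now])

def split_line_by_xgap (line_items : List (List (String × Int))) : List (List (List (String × Int))) :=
  match line_items with
  | [] => []
  | x :: xs => pvLoopA (pvGapTh line_items) x xs [] [x]

-- ===== PORT B =====
-- B's dict access, written over find? (first matching key).
def pvItemB (it : List (String × Int)) (k : String) : Int :=
  match it.find? (fun p => p.1 == k) with
  | some p => p.2
  | none => 0

-- B's 53-bit rounding: add half the step, divide, and pull an odd quotient back on exact ties.
def pvRnd53B (N : Nat) : Nat :=
  let b := N.log2 + 1
  if 53 < b then
    let h := 2 ^ (b - 53 - 1)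
    let q := (N + h) / (2 * h)
    (if N % (2 * h) = h ∧ q % 2 = 1 then q - 1 else q) * (2 * h)
  else N

-- B's trunc of the rounded double product, via the sign factor.
def pvFMulTruncB (num : Int) (c : Nat) (e : Nat) : Int :=
  Int.sign num * ((pvRnd53B (num.natAbs * c) / 2 ^ e : Nat) : Int)

-- B's preamble: the median of the sorted widths in one index formula (ws[(n-1)//2] + ws[n//2]).
def pvGapThB (line_items : List (List (String × Int))) : Int :=
  let ws := PySem.List.sorted (line_items.map (fun it => pvItemB it "w")) (fun v => v) false
  let n : Int := ws.length
  let m2 := PySem.List.pyGetD ws (PySem.Int.floordiv (n - 1) 2) 0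
      + PySem.List.pyGetD ws (PySem.Int.floordiv n 2) 0
  let m2 := if m2 = 0 then 60 else m2
  let g1 := max 35 (pvFMulTruncB m2 6305039478318694 53)
  let line_left := (PySem.List.min? (line_items.map (fun it => pvItemB it "x1")) (fun v => v)).getD 0
  let line_right := (PySem.List.max? (line_items.map (fun it => pvItemB it "x2")) (fun v => v)).getD 0
  min g1 (pvFMulTruncB (max 1 (line_right - line_left)) 5044031582654956 55)

-- B's inner for over enumerate(zip(rest, rest[1:]), 1): index of the first wide gap, else None.
def pvFirstCut (g : Int) (prev : List (String × Int)) (rest : List (List (String × Int)))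
    (i : Nat) : Option Nat :=
  match rest with
  | [] => none
  | now :: r => if pvItemB now "x1" - pvItemB prev "x2" ≥ g then some i else pvFirstCut g now r (i + 1)

-- needed by bChunks' termination proof
lemma pvFirstCut_ge (g : Int) : ∀ (rest : List (List (String × Int))) prev i0 i,
    pvFirstCut g prev rest i0 = some i → i0 ≤ i := by
  intro rest
  induction rest with
  | nil => intro prev i0 i h; simp [pvFirstCut] at h
  | cons now r ih =>
    intro prev i0 i h
    by_cases hc : pvItemB now "x1" - pvItemB prev "x2" ≥ g
    · simp [pvFirstCut, hc] at h; omega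
    · simp only [pvFirstCut, if_neg hc] at h
      have := ih now (i0 + 1) i h; omega

-- B's while loop: cut the first chunk off, keep going on the remainder.
def pvChunksB (g : Int) (rest : List (List (String × Int))) : List (List (List (String × Int))) :=
  match rest with
  | [] => [[]]   -- unreachable at the call site (rest is always nonempty)
  | p :: r =>
    match h : pvFirstCut g p r 1 with
    | none => [p :: r]
    -- h is used by the decreasing_by proof below
    | some i =>
      PySem.List.slice (p :: r) none (some (i : Int)) ::
        pvChunksB g (PySem.List.slice (p :: r) (some (i : Int)) none)
termination_by rest.length
decreasing_by
  have h1 : 1 ≤ i := pvFirstCut_ge g r p 1 i h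
  simp [PySem.List.slice_from_natCast]
  omega

def split_line_by_xgap_alt (line_items : List (List (String × Int))) : List (List (List (String × Int))) :=
  match line_items with
  | [] => []
  | _ :: _ => pvChunksB (pvGapThB line_items) line_items

-- ===== PRECONDITION & SPEC =====
-- Pre_ excludes only items missing one of the keys "w", "x1", "x2", on which A raises KeyError.
def Pre_split_line_by_xgap (line_items : List (List (String × Int))) : Prop :=
  (line_items.all (fun it => ((it.lookup "w").isSome && (it.lookup "x1").isSome && (it.lookup "x2").isSome))) = true
instance (line_items : List (List (String × Int))) : Decidable (Pre_split_line_by_xgap line_items) := by unfold Pre_split_line_by_xgap; infer_instance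

def pvWitness_split_line_by_xgap : (List (List (String × Int))) :=
  [[("w", 10), ("x1", 0), ("x2", 9)], [("w", 12), ("x1", 300), ("x2", 320)]]

def Spec_split_line_by_xgap (line_items : List (List (String × Int))) (out : List (List (List (String × Int)))) : Prop := out = split_line_by_xgap_alt line_items
instance (line_items : List (List (String × Int))) (out : List (List (List (String × Int)))) : Decidable (Spec_split_line_by_xgap line_items out) := by unfold Spec_split_line_by_xgap; infer_instance

-- ===== CLAIM (what is proved, stated in full; the proofs are below) =====
def Claim_equal_split_line_by_xgap : Prop := ∀ (line_items : List (List (String × Int))), Dom_split_line_by_xgap line_items → Pre_split_line_by_xgap line_items → Spec_split_line_by_xgap line_items (split_line_by_xgap line_items)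

-- ===== LEMMAS AND PROOFS =====

lemma key_eq (it : List (String × Int)) (k : String) : pvItemB it k = pvKey it k := by
  induction it with
  | nil => rfl
  | cons p t ih =>
    by_cases h : p.1 = k
    · simp [pvItemB, pvKey, List.find?, List.lookup, h]
    · simp only [pvItemB, pvKey, List.find?, List.lookup] at *
      have hb : (p.1 == k) = false := by simp [h]
      have hb' : (k == p.1) = false := by simp [Ne.symm h]
      simp [hb, hb', ih]

-- the two half-even roundings agree (pure arithmetic bridge)
lemma round_bridge (N K P : Nat) (hK : K = 2 * P) (hP : 0 < P) :
    (if N % K = P ∧ (N + P) / K % 2 = 1 then (N + P) / K - 1 else (N + P) / K) * K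
      = (if 2 * (N % K) > K ∨ (2 * (N % K) = K ∧ (N / K) % 2 = 1) then N / K + 1 else N / K) * K := by
  have hK0 : 0 < K := by omega
  have hr : N % K < K := Nat.mod_lt _ hK0
  have hdm : K * (N / K) + N % K = N := Nat.div_add_mod N K
  have hq1 : (N + P) / K = N / K + (N % K + P) / K := by
    conv_lhs => rw [← hdm]
    rw [Nat.add_assoc, Nat.mul_add_div hK0]
  have hsub : (N % K + P) / K = if N % K < P then 0 else 1 := by
    split_ifs with h
    · exact Nat.div_eq_of_lt (by omega)
    · refine Nat.div_eq_of_lt_le (by omega) (by omega)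
  rw [hsub] at hq1
  clear hsub
  generalize hgr : N % K = r at hr hq1 ⊢
  generalize hgq : N / K = q at hq1 ⊢
  generalize hgq1 : (N + P) / K = q1 at hq1 ⊢
  by_cases hrp : r < P
  · rw [if_pos hrp, Nat.add_zero] at hq1
    split_ifs with h1 h2 <;> exact congrArg (· * K) (by omega)
  · rw [if_neg hrp] at hq1
    split_ifs with h1 h2 <;> exact congrArg (· * K) (by omega)

lemma rnd53B_eq (N : Nat) : pvRnd53B N = pvRnd53 N := by
  simp only [pvRnd53B, pvRnd53]
  by_cases hb : N.log2 + 1 ≤ 53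
  · rw [if_neg (by omega), if_pos hb]
  · rw [if_pos (by omega), if_neg hb]
    have hs : N.log2 + 1 - 53 - 1 + 1 = N.log2 + 1 - 53 := by omega
    have hK : 2 ^ (N.log2 + 1 - 53) = 2 * 2 ^ (N.log2 + 1 - 53 - 1) := by
      rw [← pow_succ']
      exact (congrArg (2 ^ ·) hs).symm
    rw [hK]
    exact round_bridge N _ _ rfl (by positivity)

lemma fmulTruncB_eq (num : Int) (c e : Nat) : pvFMulTruncB num c e = pvFMulTrunc num c e := by
  unfold pvFMulTruncB pvFMulTrunc
  have habs : (num * (c : Int)).natAbs = num.natAbs * c := by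
    rw [Int.natAbs_mul, Int.natAbs_natCast]
  rw [habs, rnd53B_eq]
  rcases lt_trichotomy num 0 with h | h | h
  · rw [Int.sign_eq_neg_one_of_neg h, if_pos h]; ring
  · subst h
    simp [pvRnd53, Nat.log2]
  · rw [Int.sign_eq_one_of_pos h, if_neg (by omega)]; ring

-- B's single index formula equals A's parity-split median (×2)
lemma med2B_eq (vals : List Int) :
    PySem.List.pyGetD (PySem.List.sorted vals (fun v => v) false)
        (PySem.Int.floordiv (((PySem.List.sorted vals (fun v => v) false).length : Int) - 1) 2) 0
      + PySem.List.pyGetD (PySem.List.sorted vals (fun v => v) false)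
        (PySem.Int.floordiv ((PySem.List.sorted vals (fun v => v) false).length : Int) 2) 0
      = pvMedian2 vals := by
  simp only [pvMedian2]
  set s := PySem.List.sorted vals (fun v => v) false
  set n : Int := (s.length : Int) with hn
  have hn0 : 0 ≤ n := by simp [hn]
  have hmod : PySem.Int.mod n 2 = n % 2 := PySem.Int.mod_eq_emod_of_pos (by omega)
  have hfd : PySem.Int.floordiv n 2 = n / 2 := PySem.Int.floordiv_eq_ediv_of_pos (by omega)
  have hfd1 : PySem.Int.floordiv (n - 1) 2 = (n - 1) / 2 := PySem.Int.floordiv_eq_ediv_of_pos (by omega)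
  by_cases hp : n % 2 = 1
  · have hidx : (n - 1) / 2 = n / 2 := by omega
    rw [if_pos (by rw [hmod]; exact hp), hfd1, hfd, hidx]
    ring
  · have hidx : (n - 1) / 2 = n / 2 - 1 := by omega
    rw [if_neg (by rw [hmod]; exact hp), hfd1, hfd, hidx]

lemma gapThB_eq (line_items : List (List (String × Int))) : pvGapThB line_items = pvGapTh line_items := by
  simp only [pvGapThB, pvGapTh, key_eq, fmulTruncB_eq]
  rw [med2B_eq]

-- ==== A's loop as a tail-free splitter ====
def splitRec (g : Int) (prev : List (String × Int)) (rest : List (List (String × Int)))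
    (cur : List (List (String × Int))) : List (List (List (String × Int))) :=
  match rest with
  | [] => [cur]
  | now :: r =>
    if pvKey now "x1" - pvKey prev "x2" ≥ g then cur :: splitRec g now r [now]
    else splitRec g now r (cur ++ [now])

lemma loopA_eq (g : Int) : ∀ (rest : List (List (String × Int))) prev chunks cur,
    pvLoopA g prev rest chunks cur = chunks ++ splitRec g prev rest cur := by
  intro rest
  induction rest with
  | nil => intro prev chunks cur; simp [pvLoopA, splitRec]
  | cons now r ih =>
    intro prev chunks cur
    by_cases h : pvKey now "x1" - pvKey prev "x2" ≥ g <;>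
      simp [pvLoopA, splitRec, h, ih, List.append_assoc]

-- ==== first-cut machinery ====
lemma firstCut_shift (g : Int) : ∀ (rest : List (List (String × Int))) prev k,
    pvFirstCut g prev rest k = (pvFirstCut g prev rest 0).map (· + k) := by
  intro rest
  induction rest with
  | nil => intro prev k; simp [pvFirstCut]
  | cons now r ih =>
    intro prev k
    by_cases h : pvItemB now "x1" - pvItemB prev "x2" ≥ g
    · simp [pvFirstCut, h]
    · simp only [pvFirstCut, if_neg h]
      rw [ih now (k + 1), ih now 1]
      cases pvFirstCut g now r 0 <;> simp <;> omega

-- within a chain of small gaps: no cut between any two adjacent items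
def noCutChain (g : Int) : List (List (String × Int)) → Prop
  | a :: b :: t => ¬ pvKey b "x1" - pvKey a "x2" ≥ g ∧ noCutChain g (b :: t)
  | _ => True

lemma chain_snoc (g : Int) : ∀ (cs : List (List (String × Int))) c prev now,
    noCutChain g (c :: cs) → (c :: cs).getLast? = some prev →
    ¬ pvKey now "x1" - pvKey prev "x2" ≥ g →
    noCutChain g (c :: (cs ++ [now])) ∧ (c :: (cs ++ [now])).getLast? = some now := by
  intro cs
  induction cs with
  | nil =>
    intro c prev now _ hl hnc
    simp at hl
    subst hl
    exact ⟨⟨hnc, trivial⟩, rfl⟩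
  | cons c2 cs' ih =>
    intro c prev now hch hl hnc
    obtain ⟨hnc2, hch'⟩ : (¬ pvKey c2 "x1" - pvKey c "x2" ≥ g) ∧ noCutChain g (c2 :: cs') := hch
    have hl' : (c2 :: cs').getLast? = some prev := by
      rw [← hl]; exact (List.getLast?_cons_cons ..).symm
    obtain ⟨h1, h2⟩ := ih c2 prev now hch' hl' hnc
    refine ⟨⟨hnc2, h1⟩, ?_⟩
    rw [← h2]
    simp only [List.cons_append]
    exact List.getLast?_cons_cons ..

-- the first cut past a chain of small gaps is found in the remainder, index shifted by the chain length
lemma firstCut_chain (g : Int) : ∀ (cs : List (List (String × Int))) c prev rest,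
    noCutChain g (c :: cs) →
    (c :: cs).getLast? = some prev →
    pvFirstCut g c (cs ++ rest) 0 = (pvFirstCut g prev rest 0).map (· + cs.length) := by
  intro cs
  induction cs with
  | nil =>
    intro c prev rest _ hl
    simp at hl
    subst hl
    simp only [List.nil_append, List.length_nil]
    cases pvFirstCut g c rest 0 <;> simp
  | cons c2 cs' ih =>
    intro c prev rest hch hl
    obtain ⟨hnc, hch'⟩ : (¬ pvKey c2 "x1" - pvKey c "x2" ≥ g) ∧ noCutChain g (c2 :: cs') := hch
    have hl' : (c2 :: cs').getLast? = some prev := by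
      rw [← hl]; exact (List.getLast?_cons_cons ..).symm
    have hnc' : ¬ pvItemB c2 "x1" - pvItemB c "x2" ≥ g := by
      rw [key_eq, key_eq]; exact hnc
    simp only [List.cons_append, pvFirstCut, if_neg hnc']
    rw [firstCut_shift g (cs' ++ rest) c2 1, ih c2 prev rest hch' hl']
    cases pvFirstCut g prev rest 0 <;> simp <;> omega

-- unfolding equations for pvChunksB
lemma chunksB_none (g : Int) (p : List (String × Int)) (r : List (List (String × Int)))
    (h : pvFirstCut g p r 1 = none) : pvChunksB g (p :: r) = [p :: r] := by
  rw [pvChunksB]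
  split <;> simp_all

lemma chunksB_some (g : Int) (p : List (String × Int)) (r : List (List (String × Int))) (i : Nat)
    (h : pvFirstCut g p r 1 = some i) :
    pvChunksB g (p :: r) = PySem.List.slice (p :: r) none (some (i : Int)) ::
      pvChunksB g (PySem.List.slice (p :: r) (some (i : Int)) none) := by
  rw [pvChunksB]
  split <;> simp_all

-- main bridge: A's accumulator splitter = B's first-cut slicer, for any chained accumulator
lemma main_bridge (g : Int) : ∀ (rest : List (List (String × Int))) c cs prev,
    noCutChain g (c :: cs) →
    (c :: cs).getLast? = some prev →
    splitRec g prev rest (c :: cs) = pvChunksB g ((c :: cs) ++ rest) := by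
  intro rest
  induction rest with
  | nil =>
    intro c cs prev hch hl
    have h0 : pvFirstCut g c (cs ++ []) 0 = none := by
      rw [firstCut_chain g cs c prev [] hch hl]; rfl
    have h1 : pvFirstCut g c cs 1 = none := by
      rw [firstCut_shift g cs c 1]
      rw [List.append_nil] at h0
      rw [h0]; rfl
    simp only [List.append_nil]
    rw [chunksB_none g c cs h1]
    rfl
  | cons now r ih =>
    intro c cs prev hch hl
    by_cases hC : pvKey now "x1" - pvKey prev "x2" ≥ g
    · have h0 : pvFirstCut g c (cs ++ now :: r) 0 = some cs.length := by
        rw [firstCut_chain g cs c prev (now :: r) hch hl]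
        simp [pvFirstCut, key_eq, hC]
      have h1 : pvFirstCut g c (cs ++ now :: r) 1 = some (cs.length + 1) := by
        rw [firstCut_shift g _ c 1, h0]; rfl
      have hlen : cs.length + 1 = (c :: cs).length := by simp
      have hsr : splitRec g prev (now :: r) (c :: cs) = (c :: cs) :: splitRec g now r [now] := by
        simp [splitRec, hC]
      rw [hsr]
      simp only [List.cons_append]
      rw [chunksB_some g c (cs ++ now :: r) (cs.length + 1) h1]
      have htake : PySem.List.slice (c :: cs ++ now :: r) none (some ((cs.length + 1 : Nat) : Int))
          = c :: cs := by
        rw [PySem.List.slice_to_natCast, hlen]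
        exact List.take_left ..
      have hdrop : PySem.List.slice (c :: cs ++ now :: r) (some ((cs.length + 1 : Nat) : Int)) none
          = now :: r := by
        rw [PySem.List.slice_from_natCast, hlen]
        exact List.drop_left ..
      rw [← List.cons_append]
      rw [htake, hdrop]
      refine congrArg _ ?_
      have := ih now [] now trivial rfl
      simpa using this
    · obtain ⟨hch2, hl2⟩ := chain_snoc g cs c prev now hch hl hC
      have hsr : splitRec g prev (now :: r) (c :: cs) = splitRec g now r ((c :: cs) ++ [now]) := by
        simp [splitRec, hC]
      rw [hsr]
      have := ih c (cs ++ [now]) now hch2 hl2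
      rw [show ((c :: cs) ++ [now]) = c :: (cs ++ [now]) by simp] at *
      rw [this]
      congr 1
      simp

-- ===== VERDICT (by name: the statement is the Claim_ definition above) =====
theorem split_line_by_xgap_spec : Claim_equal_split_line_by_xgap := by
  intro line_items _ _
  unfold Spec_split_line_by_xgap
  cases line_items with
  | nil => rfl
  | cons x xs =>
    show pvLoopA (pvGapTh (x :: xs)) x xs [] [x] = split_line_by_xgap_alt (x :: xs)
    have halt : split_line_by_xgap_alt (x :: xs) = pvChunksB (pvGapThB (x :: xs)) (x :: xs) := rfl
    rw [halt, gapThB_eq, loopA_eq, List.nil_append]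
    have := main_bridge (pvGapTh (x :: xs)) xs x [] x trivial rfl
    simpa using this
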